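-- pv_equiv track=rewrite | github.com/nidhiatwork/Python_Coding_Practice | Hackerrank/getMaxStreaks.py | f
-- ===== SOURCE A (Python) =====
-- def f(toss, c):
--     ct=0
--     mx_ct=0
--     for i in range(len(toss)):
--         if toss[i]!=c:
--             mx_ct=max(mx_ct,ct)
--             ct=0
--         else:
--              ct+=1
--     return max(mx_ct,ct)
-- ===== SOURCE B (Python) =====
-- def f(toss, c):
--     # Build the run-length decomposition first, then take the max over c-runs.
--     runs = []
--     for x in toss:
--         if runs and runs[-1][0] == x:
--             runs[-1][1] += 1
--         else:
--             runs.append([x, 1])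
--     return max([0] + [n for k, n in runs if k == c])
-- ===== Notes on version B (the rewrite author's own statement) =====
-- stated objective: alternative
-- what changed: A's single counter-and-reset scan is replaced by a two-phase run-length decomposition: B first groups the list into maximal runs and then takes the maximum length among runs equal to c.
import Mathlib
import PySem

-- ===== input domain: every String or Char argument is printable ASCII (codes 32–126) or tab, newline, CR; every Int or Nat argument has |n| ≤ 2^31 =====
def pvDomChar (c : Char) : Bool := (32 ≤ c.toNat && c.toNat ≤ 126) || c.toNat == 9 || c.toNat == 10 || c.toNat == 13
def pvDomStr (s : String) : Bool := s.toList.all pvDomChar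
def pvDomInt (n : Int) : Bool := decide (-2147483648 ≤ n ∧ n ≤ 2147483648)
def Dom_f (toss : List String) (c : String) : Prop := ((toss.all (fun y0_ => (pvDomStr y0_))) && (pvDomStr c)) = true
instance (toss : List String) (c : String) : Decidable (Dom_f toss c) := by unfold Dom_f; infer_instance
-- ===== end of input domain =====

-- B replaces A's counter-with-reset scan by a two-phase run-length decomposition
-- (group into maximal runs, then maximise over the runs equal to c); alternative, same cost.

-- ===== PORT A =====
-- A: running counter ct, reset on mismatch, running maximum mx_ct; returns max(mx_ct, ct).
def f (toss : List String) (c : String) : Int :=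
  let s := toss.foldl (fun (s : Int × Int) t =>
    if t ≠ c then ((0 : Int), max s.2 s.1) else (s.1 + 1, s.2)) ((0 : Int), (0 : Int))
  max s.2 s.1

-- ===== PORT B =====
-- B: build the run-length decomposition `runs`, then max([0] + [n for k,n in runs if k == c]).
def f_alt (toss : List String) (c : String) : Int :=
  let runs := toss.foldl (fun (runs : List (String × Int)) x =>
    match runs.getLast? with
    | some (k, n) => if k = x then runs.dropLast ++ [(k, n + 1)] else runs ++ [(x, (1 : Int))]
    | none => [(x, (1 : Int))]) []
  (PySem.List.max? ((0 : Int) :: (runs.filter (fun p => p.1 = c)).map (fun p => p.2)) (fun y => y)).getD 0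

-- ===== PRECONDITION & SPEC =====
def Spec_f (toss : List String) (c : String) (out : Int) : Prop := out = f_alt toss c
instance (toss : List String) (c : String) (out : Int) : Decidable (Spec_f toss c out) := by unfold Spec_f; infer_instance

-- ===== CLAIM (what is proved, stated in full; the proofs are below) =====
def Claim_equal_f : Prop := ∀ (toss : List String) (c : String), Dom_f toss c → Spec_f toss c (f toss c)

-- ===== LEMMAS AND PROOFS =====

-- A's loop step and B's loop step, named for the proofs.
def stepA (c : String) (s : Int × Int) (t : String) : Int × Int :=
  if t ≠ c then ((0 : Int), max s.2 s.1) else (s.1 + 1, s.2)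

def stepB (r : List (String × Int)) (x : String) : List (String × Int) :=
  match r.getLast? with
  | some (k, n) => if k = x then r.dropLast ++ [(k, n + 1)] else r ++ [(x, (1 : Int))]
  | none => [(x, (1 : Int))]

-- the "max over c-runs" reduction, as a left fold
def gmax (c : String) (m : Int) (p : String × Int) : Int := if p.1 = c then max m p.2 else m

def maxC (c : String) (r : List (String × Int)) : Int := r.foldl (gmax c) 0

lemma le_foldl_gmax (c : String) (r : List (String × Int)) :
    ∀ a : Int, a ≤ r.foldl (gmax c) a := by
  induction r with
  | nil => intro a; simp
  | cons p t ih =>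
    intro a
    have h1 : a ≤ gmax c a p := by
      unfold gmax; split_ifs <;> simp
    exact le_trans h1 (by simpa [List.foldl] using ih (gmax c a p))

lemma maxC_nonneg (c : String) (r : List (String × Int)) : 0 ≤ maxC c r :=
  le_foldl_gmax c r 0

lemma maxC_concat (c : String) (r : List (String × Int)) (p : String × Int) :
    maxC c (r ++ [p]) = gmax c (maxC c r) p := by
  simp [maxC, List.foldl_append]

-- max over the filtered-and-mapped run lengths equals the single gmax fold
lemma foldl_max_filter (c : String) (r : List (String × Int)) :
    ∀ a : Int, ((r.filter (fun p => p.1 = c)).map (fun p => p.2)).foldl max a = r.foldl (gmax c) a := by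
  induction r with
  | nil => intro a; simp
  | cons p t ih =>
    intro a
    by_cases h : p.1 = c
    · simp [h, gmax, List.foldl, ih]
    · simp [h, gmax, List.foldl, ih]

-- the invariant connecting A's state (ct, mx) to B's run list
def StInv (c : String) (s : Int × Int) (r : List (String × Int)) : Prop :=
  match r.getLast? with
  | none => s = (0, 0)
  | some (k, n) => s.1 = (if k = c then n else 0) ∧ s.2 = maxC c r.dropLast

lemma step_inv (c x : String) (s : Int × Int) (r : List (String × Int)) (h : StInv c s r) :
    StInv c (stepA c s x) (stepB r x) := by
  rcases r.eq_nil_or_concat with rfl | ⟨l, ⟨k, n⟩, rfl⟩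
  · have hs : s = (0, 0) := by simpa [StInv] using h
    subst hs
    by_cases hx : x = c <;>
      simp [StInv, stepA, stepB, hx, maxC]
  · rw [List.concat_eq_append] at h ⊢
    have h' : s.1 = (if k = c then n else 0) ∧ s.2 = maxC c l := by
      simpa [StInv, List.getLast?_concat, List.dropLast_concat] using h
    obtain ⟨h1, h2⟩ := h'
    unfold stepB
    rw [List.getLast?_concat]
    by_cases hkx : k = x
    · -- extend the last run
      subst hkx
      simp only [List.dropLast_concat]
      by_cases hkc : k = c
      · subst hkc
        simp [StInv, stepA, h1, h2]
      · have hs1 : s.1 = 0 := by rw [h1, if_neg hkc]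
        have hmx : max s.2 0 = maxC c l := by
          rw [h2]; exact max_eq_left (maxC_nonneg c l)
        simp [StInv, stepA, hkc, hs1, hmx]
    · -- start a new run [(x,1)]
      simp only [if_neg hkx]
      by_cases hxc : x = c
      · have hkc : ¬ k = c := fun hh => hkx (hh.trans hxc.symm)
        have hkeep : maxC c ((l ++ [(k, n)] ++ [(x, 1)]).dropLast) = s.2 := by
          rw [List.dropLast_concat, maxC_concat, gmax, if_neg hkc, h2]
        simp only [StInv, stepA, List.getLast?_concat]
        refine ⟨by simp [hxc, h1, hkc], ?_⟩
        simp only [hxc]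
        rw [List.dropLast_concat, maxC_concat, gmax, if_neg hkc, h2]
        simp
      · have hmx : max s.2 s.1 = maxC c (l ++ [(k, n)]) := by
          rw [maxC_concat, gmax, h1, h2]
          by_cases hkc : k = c
          · simp [hkc]
          · simp [hkc, max_eq_left (maxC_nonneg c l)]
        have hdrop : (l ++ [(k, n)] ++ [(x, 1)]).dropLast = l ++ [(k, n)] := List.dropLast_concat ..
        simp [StInv, stepA, hxc, hmx]

lemma loop_inv (c : String) (toss : List String) :
    ∀ (s : Int × Int) (r : List (String × Int)), StInv c s r →
      StInv c (toss.foldl (stepA c) s) (toss.foldl stepB r) := by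
  induction toss with
  | nil => intro s r h; exact h
  | cons x t ih => intro s r h; exact ih _ _ (step_inv c x s r h)

lemma inv_final (c : String) (s : Int × Int) (r : List (String × Int)) (h : StInv c s r) :
    max s.2 s.1 = maxC c r := by
  rcases r.eq_nil_or_concat with rfl | ⟨l, ⟨k, n⟩, rfl⟩
  · have hs : s = (0, 0) := by simpa [StInv] using h
    simp [hs, maxC]
  · rw [List.concat_eq_append] at h ⊢
    have h' : s.1 = (if k = c then n else 0) ∧ s.2 = maxC c l := by
      simpa [StInv, List.getLast?_concat, List.dropLast_concat] using h
    obtain ⟨h1, h2⟩ := h'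
    rw [maxC_concat, gmax, h1, h2]
    by_cases hkc : k = c
    · simp [hkc]
    · simp [hkc, max_eq_left (maxC_nonneg c l)]

-- ===== VERDICT (by name: the statement is the Claim_ definition above) =====
theorem f_spec : Claim_equal_f := by
  intro toss c _
  unfold Spec_f
  have hA : f toss c
      = max (toss.foldl (stepA c) (0, 0)).2 (toss.foldl (stepA c) (0, 0)).1 := rfl
  have hB : f_alt toss c
      = (PySem.List.max? ((0 : Int) ::
          ((toss.foldl stepB []).filter (fun p => p.1 = c)).map (fun p => p.2))
          (fun y => y)).getD 0 := rfl
  rw [hA, hB, PySem.List.max?_id_cons, Option.getD_some]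
  have hInv : StInv c (toss.foldl (stepA c) (0, 0)) (toss.foldl stepB []) :=
    loop_inv c toss (0, 0) [] (by simp [StInv])
  rw [inv_final c _ _ hInv, foldl_max_filter c _ 0]
  rfl
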